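-- pv_equiv track=rewrite | github.com/aidenmak0624/HR_agent | src/mcp/server.py | _match_uri_template
-- ===== SOURCE A (Python) =====
-- def _match_uri_template(template: str, uri: str) -> bool:
--     """Check if a URI matches a template pattern (e.g., hr://employees/{id})."""
--     import re
--
--     # Convert template to regex: {param} -> [^/]+
--     pattern = re.sub(r"\{[^}]+\}", r"[^/]+", re.escape(template))
--     pattern = pattern.replace(r"\{", "{").replace(r"\}", "}")
--     # Re-do properly
--     pattern = re.sub(r"\{[^}]+\}", "[^/]+", template)
--     pattern = "^" + re.escape(pattern).replace(r"\[^/\]\+", "[^/]+") + "$"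
--     # Simpler approach
--     parts_tmpl = template.split("/")
--     parts_uri = uri.split("/")
--     if len(parts_tmpl) != len(parts_uri):
--         return False
--     for t, u in zip(parts_tmpl, parts_uri):
--         if t.startswith("{") and t.endswith("}"):
--             continue  # Wildcard match
--         if t != u:
--             return False
--     return True
-- ===== SOURCE B (Python) =====
-- def _match_uri_template(template: str, uri: str) -> bool:
--     """Segment-by-segment recursive match via str.partition, no list building."""
--     t, sep_t, rest_t = template.partition("/")
--     u, sep_u, rest_u = uri.partition("/")
--     if not (t.startswith("{") and t.endswith("}")) and t != u:
--         return False
--     if sep_t != sep_u: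
--         return False
--     if not sep_t:
--         return True
--     return _match_uri_template(rest_t, rest_u)
-- ===== Notes on version B (the rewrite author's own statement) =====
-- stated objective: simpler
-- what changed: B drops A's dead regex scaffolding and replaces split-both-strings-into-lists + length check + zip loop by a single segment-at-a-time recursion using str.partition('/'), never materializing the segment lists.
import Mathlib
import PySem

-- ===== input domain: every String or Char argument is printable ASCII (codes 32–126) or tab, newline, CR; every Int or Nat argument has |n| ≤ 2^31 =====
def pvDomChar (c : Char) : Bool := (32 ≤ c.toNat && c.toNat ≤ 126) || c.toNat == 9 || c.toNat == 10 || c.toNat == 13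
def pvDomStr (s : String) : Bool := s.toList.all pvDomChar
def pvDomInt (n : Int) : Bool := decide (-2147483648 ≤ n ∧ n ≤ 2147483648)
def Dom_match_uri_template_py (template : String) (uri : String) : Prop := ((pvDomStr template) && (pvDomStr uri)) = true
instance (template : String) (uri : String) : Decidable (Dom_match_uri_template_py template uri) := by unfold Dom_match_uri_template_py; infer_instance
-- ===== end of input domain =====

-- B replaces A's build-both-split-lists + length check + zip loop (plus A's dead regex scaffolding)
-- by a single segment-at-a-time recursion via str.partition; objective: simpler, return value only.

-- ===== PORT A =====
-- A's first three `pattern = …` regex lines are dead code: `pattern` is never used and those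
-- constant-pattern re calls never raise, so they are not ported (they cannot affect the result).
-- `for t, u in zip(...)` with continue / early return:
def pvMatchLoop : List (List Char × List Char) → Bool
  | [] => true
  | (t, u) :: rest =>
    if PySem.Chars.startswith t ['{'] = true ∧ PySem.Chars.endswith t ['}'] = true then
      pvMatchLoop rest            -- continue: wildcard match
    else if t ≠ u then false
    else pvMatchLoop rest

def match_uri_template_py (template : String) (uri : String) : Bool :=
  -- template.split("/") / uri.split("/"): sep ≠ "", exact as PySem.Chars.splitOn on the char lists
  let parts_tmpl := PySem.Chars.splitOn template.toList ['/']
  let parts_uri := PySem.Chars.splitOn uri.toList ['/']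
  if parts_tmpl.length ≠ parts_uri.length then false
  else pvMatchLoop (parts_tmpl.zip parts_uri)

-- ===== PORT B =====
-- s.partition("/") for the 1-char separator: exact hand port — (part before first '/',
-- whether '/' occurs, part after it); Python returns ("/" or "") as the middle component,
-- carried here as a Bool.
def pvPartitionSlash : List Char → List Char × Bool × List Char
  | [] => ([], false, [])
  | c :: rest =>
    if c = '/' then ([], true, rest)
    else (c :: (pvPartitionSlash rest).1, (pvPartitionSlash rest).2.1, (pvPartitionSlash rest).2.2)

theorem pvPartitionSlash_rest_lt (s : List Char) (h : (pvPartitionSlash s).2.1 = true) :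
    (pvPartitionSlash s).2.2.length < s.length := by
  induction s with
  | nil => simp [pvPartitionSlash] at h
  | cons c r ih =>
    by_cases hc : c = '/'
    · simp [pvPartitionSlash, hc]
    · simp only [pvPartitionSlash, if_neg hc] at h ⊢
      exact Nat.lt_succ_of_lt (ih h)

def pvAltGo (t u : List Char) : Bool :=
  if ¬ (PySem.Chars.startswith (pvPartitionSlash t).1 ['{'] = true ∧
        PySem.Chars.endswith (pvPartitionSlash t).1 ['}'] = true) ∧
     (pvPartitionSlash t).1 ≠ (pvPartitionSlash u).1 then false
  else if (pvPartitionSlash t).2.1 ≠ (pvPartitionSlash u).2.1 then false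
  else if (pvPartitionSlash t).2.1 = false then true
  else pvAltGo (pvPartitionSlash t).2.2 (pvPartitionSlash u).2.2
termination_by t.length
decreasing_by
  exact pvPartitionSlash_rest_lt t (by simp_all)

def match_uri_template_py_alt (template : String) (uri : String) : Bool :=
  pvAltGo template.toList uri.toList

-- ===== PRECONDITION & SPEC =====
def Spec_match_uri_template_py (template : String) (uri : String) (out : Bool) : Prop := out = match_uri_template_py_alt template uri
instance (template : String) (uri : String) (out : Bool) : Decidable (Spec_match_uri_template_py template uri out) := by unfold Spec_match_uri_template_py; infer_instance

-- ===== CLAIM (what is proved, stated in full; the proofs are below) =====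
def Claim_equal_match_uri_template_py : Prop := ∀ (template : String) (uri : String), Dom_match_uri_template_py template uri → Spec_match_uri_template_py template uri (match_uri_template_py template uri)

-- ===== LEMMAS AND PROOFS =====

-- the segments of s as pvAltGo walks them (first segment, then recurse past the '/')
def pvSegs (s : List Char) : List (List Char) :=
  if _hps : (pvPartitionSlash s).2.1 = true then
    (pvPartitionSlash s).1 :: pvSegs (pvPartitionSlash s).2.2
  else [(pvPartitionSlash s).1]
termination_by s.length
decreasing_by exact pvPartitionSlash_rest_lt s _hps

def pvModHead (f : List Char → List Char) : List (List Char) → List (List Char)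
  | [] => []
  | h :: r => f h :: r

theorem pvSegs_ne_nil (s : List Char) : pvSegs s ≠ [] := by
  rw [pvSegs]; split <;> simp

theorem pvSegs_cons_ne (c : Char) (s : List Char) (hc : c ≠ '/') :
    pvSegs (c :: s) = pvModHead (c :: ·) (pvSegs s) := by
  conv_lhs => rw [pvSegs]
  conv_rhs => rw [pvSegs]
  simp only [pvPartitionSlash, if_neg hc]
  split <;> simp_all [pvModHead]

theorem pvSegs_cons_slash (s : List Char) :
    pvSegs ('/' :: s) = [] :: pvSegs s := by
  rw [pvSegs]
  simp [pvPartitionSlash]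

theorem pv_go_segs (fuel : Nat) : ∀ (l cur : List Char) (acc : List (List Char)),
    l.length ≤ fuel →
    PySem.Chars.splitOn.go ['/'] fuel l cur acc
      = acc.reverse ++ pvModHead (cur.reverse ++ ·) (pvSegs l) := by
  induction fuel with
  | zero =>
    intro l cur acc h
    have : l = [] := by cases l <;> simp_all
    subst this
    rw [pvSegs]
    simp [PySem.Chars.splitOn.go, pvPartitionSlash, pvModHead]
  | succ fuel ih =>
    intro l cur acc h
    cases l with
    | nil =>
      rw [pvSegs]
      simp [PySem.Chars.splitOn.go, pvPartitionSlash, pvModHead]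
    | cons c rest =>
      by_cases hc : c = '/'
      · subst hc
        have hpre : List.isPrefixOf ['/'] ('/' :: rest) = true := by simp [List.isPrefixOf]
        rw [PySem.Chars.splitOn.go]
        simp only [hpre, if_true, List.length_cons, List.length_nil, Nat.zero_add,
          List.drop_succ_cons, List.drop_zero]
        rw [ih rest [] _ (by simpa using Nat.le_of_succ_le_succ h)]
        rw [pvSegs_cons_slash]
        cases hs : pvSegs rest with
        | nil => exact absurd hs (pvSegs_ne_nil rest)
        | cons a b => simp [pvModHead]
      · have hpre : List.isPrefixOf ['/'] (c :: rest) = false := by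
          simp [List.isPrefixOf]; exact fun hh => absurd hh.symm hc
        rw [PySem.Chars.splitOn.go]
        simp only [hpre, Bool.false_eq_true, if_false]
        rw [ih rest (c :: cur) acc (by simpa using Nat.le_of_succ_le_succ h)]
        rw [pvSegs_cons_ne c rest hc]
        cases hs : pvSegs rest with
        | nil => exact absurd hs (pvSegs_ne_nil rest)
        | cons a b => simp [pvModHead]

theorem pvSplitOn_eq_segs (l : List Char) :
    PySem.Chars.splitOn l ['/'] = pvSegs l := by
  rw [PySem.Chars.splitOn, pv_go_segs (l.length + 1) l [] [] (Nat.le_succ _)]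
  cases hs : pvSegs l with
  | nil => exact absurd hs (pvSegs_ne_nil l)
  | cons a b => simp [pvModHead]

theorem pvSegs_pos (s : List Char) (h : (pvPartitionSlash s).2.1 = true) :
    pvSegs s = (pvPartitionSlash s).1 :: pvSegs (pvPartitionSlash s).2.2 := by
  rw [pvSegs]; simp [h]

theorem pvSegs_neg (s : List Char) (h : (pvPartitionSlash s).2.1 = false) :
    pvSegs s = [(pvPartitionSlash s).1] := by
  rw [pvSegs]; simp [h]

theorem pv_main (n : Nat) : ∀ (t u : List Char), t.length ≤ n →
    (if (pvSegs t).length ≠ (pvSegs u).length then false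
     else pvMatchLoop ((pvSegs t).zip (pvSegs u))) = pvAltGo t u := by
  induction n with
  | zero =>
    intro t u h
    have ht : t = [] := by cases t <;> simp_all
    subst ht
    rw [pvAltGo]
    rw [pvSegs_neg [] (by simp [pvPartitionSlash])]
    by_cases hu : (pvPartitionSlash u).2.1 = true
    · rw [pvSegs_pos u hu]
      have hlen : ([(pvPartitionSlash []).1] : List (List Char)).length ≠
          ((pvPartitionSlash u).1 :: pvSegs (pvPartitionSlash u).2.2).length := by
        have := List.length_pos_iff.mpr (pvSegs_ne_nil (pvPartitionSlash u).2.2)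
        simp only [List.length_cons, List.length_nil]; omega
      simp only [if_pos hlen]
      simp [pvPartitionSlash, hu]
    · have hu' : (pvPartitionSlash u).2.1 = false := by simpa using hu
      rw [pvSegs_neg u hu']
      simp only [pvPartitionSlash, List.length_singleton, ne_eq, not_true_eq_false,
        not_false_eq_true, if_neg, List.zip_cons_cons, List.zip_nil_right, pvMatchLoop, hu']
      by_cases hw : PySem.Chars.startswith ([] : List Char) ['{'] = true ∧
          PySem.Chars.endswith ([] : List Char) ['}'] = true
      · simp [hw]
      · by_cases he : ([] : List Char) = (pvPartitionSlash u).1 <;> simp [hw, he]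
  | succ n ih =>
    intro t u h
    rw [pvAltGo]
    by_cases hts : (pvPartitionSlash t).2.1 = true <;>
      by_cases hus : (pvPartitionSlash u).2.1 = true
    · -- both have a '/': heads then recurse
      rw [pvSegs_pos t hts, pvSegs_pos u hus]
      simp only [hts, hus]
      have hrec := ih (pvPartitionSlash t).2.2 (pvPartitionSlash u).2.2
        (Nat.le_of_lt_succ (Nat.lt_of_lt_of_le (pvPartitionSlash_rest_lt t hts) h))
      simp only [List.zip_cons_cons, List.length_cons, pvMatchLoop]
      by_cases hw : PySem.Chars.startswith (pvPartitionSlash t).1 ['{'] = true ∧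
          PySem.Chars.endswith (pvPartitionSlash t).1 ['}'] = true
      · simp only [hw]
        simp only [ne_eq, Nat.add_right_cancel_iff] at hrec ⊢
        simp [← hrec]
      · by_cases he : (pvPartitionSlash t).1 = (pvPartitionSlash u).1
        · simp only [if_neg hw,
            if_neg (by simp [he] : ¬ (pvPartitionSlash t).1 ≠ (pvPartitionSlash u).1)]
          simp only [ne_eq, Nat.add_right_cancel_iff] at hrec ⊢
          simp [he, ← hrec]
        · simp [hw, he]
    · -- t has '/', u does not: segment counts differ, B fails at the separator bool
      have hus' : (pvPartitionSlash u).2.1 = false := by simpa using hus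
      rw [pvSegs_pos t hts, pvSegs_neg u hus']
      have hlen : ((pvPartitionSlash t).1 :: pvSegs (pvPartitionSlash t).2.2).length ≠
          ([(pvPartitionSlash u).1] : List (List Char)).length := by
        have := List.length_pos_iff.mpr (pvSegs_ne_nil (pvPartitionSlash t).2.2)
        simp only [List.length_cons, List.length_nil]; omega
      simp [hts, hus']
      exact fun hc => absurd hc (pvSegs_ne_nil _)
    · have hts' : (pvPartitionSlash t).2.1 = false := by simpa using hts
      rw [pvSegs_neg t hts', pvSegs_pos u hus]
      have hlen : ([(pvPartitionSlash t).1] : List (List Char)).length ≠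
          ((pvPartitionSlash u).1 :: pvSegs (pvPartitionSlash u).2.2).length := by
        have := List.length_pos_iff.mpr (pvSegs_ne_nil (pvPartitionSlash u).2.2)
        simp only [List.length_cons, List.length_nil]; omega
      simp [hts', hus]
      exact fun hc => absurd hc (pvSegs_ne_nil _)
    · -- neither has a '/': single segments
      have hts' : (pvPartitionSlash t).2.1 = false := by simpa using hts
      have hus' : (pvPartitionSlash u).2.1 = false := by simpa using hus
      rw [pvSegs_neg t hts', pvSegs_neg u hus']
      simp only [List.length_singleton, ne_eq, not_true_eq_false, not_false_eq_true, if_neg,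
        List.zip_cons_cons, List.zip_nil_right, pvMatchLoop, hts', hus']
      by_cases hw : PySem.Chars.startswith (pvPartitionSlash t).1 ['{'] = true ∧
          PySem.Chars.endswith (pvPartitionSlash t).1 ['}'] = true
      · simp [hw]
      · by_cases he : (pvPartitionSlash t).1 = (pvPartitionSlash u).1 <;> simp [hw, he]

theorem pv_lists (t u : List Char) :
    (if (PySem.Chars.splitOn t ['/']).length ≠ (PySem.Chars.splitOn u ['/']).length then false
     else pvMatchLoop ((PySem.Chars.splitOn t ['/']).zip (PySem.Chars.splitOn u ['/']))) = pvAltGo t u := by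
  rw [pvSplitOn_eq_segs, pvSplitOn_eq_segs]
  exact pv_main t.length t u (Nat.le_refl _)

-- ===== VERDICT (by name: the statement is the Claim_ definition above) =====
theorem match_uri_template_py_spec : Claim_equal_match_uri_template_py := by
  intro template uri _
  unfold Spec_match_uri_template_py match_uri_template_py match_uri_template_py_alt
  exact pv_lists template.toList uri.toList
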